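-- pv_equiv track=rewrite | github.com/CodingThrust/problem-reductions | docs/paper/verify-reductions/adversary_three_dimensional_matching_three_partition.py | adv_solve_3dm
-- ===== SOURCE A (Python) =====
-- from itertools import combinations, product
-- from typing import Optional
--
-- def adv_solve_3dm(q: int, triples: list[tuple[int, int, int]]) -> Optional[list[int]]:
--     """Independent brute-force 3DM solver."""
--     t = len(triples)
--     if t < q:
--         return None
--     for combo in combinations(range(t), q):
--         ww = set()
--         xx = set()
--         yy = set()
--         ok = True
--         for idx in combo:
--             a, b, c = triples[idx]
--             if a in ww or b in xx or c in yy: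
--                 ok = False
--                 break
--             ww.add(a)
--             xx.add(b)
--             yy.add(c)
--         if ok and len(ww) == q and len(xx) == q and len(yy) == q:
--             cfg = [0] * t
--             for idx in combo:
--                 cfg[idx] = 1
--             return cfg
--     return None
-- ===== SOURCE B (Python) =====
-- from typing import Optional
--
-- def adv_solve_3dm(q: int, triples: list[tuple[int, int, int]]) -> Optional[list[int]]:
--     """Independent brute-force 3DM solver (recursive backtracking)."""
--     t = len(triples)
--     if t < q:
--         return None
--
--     def bt(i, chosen, ww, xx, yy):
--         if len(chosen) == q:
--             cfg = [0] * t
--             for idx in chosen: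
--                 cfg[idx] = 1
--             return cfg
--         if i == t:
--             return None
--         a, b, c = triples[i]
--         if a not in ww and b not in xx and c not in yy:
--             r = bt(i + 1, chosen + [i], ww | {a}, xx | {b}, yy | {c})
--             if r is not None:
--                 return r
--         return bt(i + 1, chosen, ww, xx, yy)
--
--     return bt(0, [], set(), set(), set())
-- ===== Notes on version B (the rewrite author's own statement) =====
-- stated objective: alternative
-- what changed: A enumerates all q-subsets of triple indices via itertools.combinations and validates each from scratch; B is a recursive include-first backtracking search over indices that carries the three used-coordinate sets and prunes a branch as soon as a coordinate repeats, returning the first (lexicographically identical) valid matching.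
import Mathlib
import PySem

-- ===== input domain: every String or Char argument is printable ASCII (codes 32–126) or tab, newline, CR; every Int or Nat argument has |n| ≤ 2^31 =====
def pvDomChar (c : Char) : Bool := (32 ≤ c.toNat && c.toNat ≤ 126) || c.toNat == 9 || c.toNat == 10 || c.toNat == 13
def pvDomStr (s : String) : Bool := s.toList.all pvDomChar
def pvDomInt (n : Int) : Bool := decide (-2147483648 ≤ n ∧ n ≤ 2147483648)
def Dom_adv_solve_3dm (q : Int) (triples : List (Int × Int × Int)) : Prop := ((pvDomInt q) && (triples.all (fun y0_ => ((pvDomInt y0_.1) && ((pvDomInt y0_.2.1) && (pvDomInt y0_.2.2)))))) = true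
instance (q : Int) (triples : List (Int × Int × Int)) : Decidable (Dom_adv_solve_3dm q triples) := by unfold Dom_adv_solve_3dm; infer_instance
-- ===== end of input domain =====

-- B replaces A's flat enumerate-all-combinations-then-validate loop by recursive
-- include-first backtracking over indices with used-coordinate pruning (objective: alternative).

-- ===== PORT A =====

-- itertools.combinations(xs, k) in Python's lexicographic order
def pvCombos {α : Type} : List α → Nat → List (List α)
  | _, 0 => [[]]
  | [], _ + 1 => []
  | x :: xs, k + 1 => (pvCombos xs k).map (x :: ·) ++ pvCombos xs (k + 1)

-- A's inner `for idx in combo` loop over the three sets, with its break (ok flag)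
def pvValidGo (triples : List (Int × Int × Int)) :
    List Int → PySem.Set Int → PySem.Set Int → PySem.Set Int →
    Bool × (PySem.Set Int × PySem.Set Int × PySem.Set Int)
  | [], ww, xx, yy => (true, (ww, xx, yy))
  | idx :: rest, ww, xx, yy =>
    let abc := PySem.List.pyGetD triples idx (0, 0, 0)  -- idx ∈ range(t), always in range
    if PySem.Set.contains ww abc.1 || PySem.Set.contains xx abc.2.1 || PySem.Set.contains yy abc.2.2 then
      (false, (ww, xx, yy))
    else
      pvValidGo triples rest (PySem.Set.add ww abc.1) (PySem.Set.add xx abc.2.1) (PySem.Set.add yy abc.2.2)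

-- cfg = [0]*t; for idx in combo: cfg[idx] = 1   (idx ≥ 0, so .toNat is exact)
def pvBuildCfgA (t : Nat) (combo : List Int) : List Int :=
  combo.foldl (fun cfg idx => cfg.set idx.toNat 1) (List.replicate t 0)

-- the outer `for combo in combinations(range(t), q)` loop
def pvFindA (q : Int) (triples : List (Int × Int × Int)) : List (List Int) → Option (List Int)
  | [] => none
  | combo :: rest =>
    let r := pvValidGo triples combo PySem.Set.empty PySem.Set.empty PySem.Set.empty
    if r.1 && (PySem.Set.len r.2.1 == q) && (PySem.Set.len r.2.2.1 == q) && (PySem.Set.len r.2.2.2 == q) then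
      some (pvBuildCfgA triples.length combo)
    else
      pvFindA q triples rest

def adv_solve_3dm (q : Int) (triples : List (Int × Int × Int)) : Option (List Int) :=
  let t := triples.length
  if (t : Int) < q then none
  else pvFindA q triples (pvCombos (PySem.List.pyRange 0 (t : Int) 1) q.toNat)

-- ===== PORT B =====

-- bt(i, chosen, ww, xx, yy); the index i walks the list, so the remaining suffix
-- triples[i:] is carried structurally (rem = [] ⟺ i == t, rem.head = triples[i]).
def pvBt (q : Int) (t : Nat) :
    List (Int × Int × Int) → Nat → List Nat → PySem.Set Int → PySem.Set Int → PySem.Set Int →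
    Option (List Int)
  | rem, i, chosen, ww, xx, yy =>
    if ((chosen.length : Int) == q) then
      some (chosen.foldl (fun cfg idx => cfg.set idx 1) (List.replicate t 0))
    else
      match rem with
      | [] => none
      | (a, b, c) :: rest =>
        if !PySem.Set.contains ww a && !PySem.Set.contains xx b && !PySem.Set.contains yy c then
          match pvBt q t rest (i + 1) (chosen ++ [i]) (PySem.Set.add ww a) (PySem.Set.add xx b) (PySem.Set.add yy c) with
          | some r => some r
          | none => pvBt q t rest (i + 1) chosen ww xx yy
        else
          pvBt q t rest (i + 1) chosen ww xx yy

def adv_solve_3dm_alt (q : Int) (triples : List (Int × Int × Int)) : Option (List Int) :=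
  let t := triples.length
  if (t : Int) < q then none
  else pvBt q t triples 0 [] PySem.Set.empty PySem.Set.empty PySem.Set.empty

-- ===== PRECONDITION & SPEC =====
-- Pre_ excludes q < 0, where Python's combinations(range(t), q) raises ValueError.
def Pre_adv_solve_3dm (q : Int) (triples : List (Int × Int × Int)) : Prop := 0 ≤ q
instance (q : Int) (triples : List (Int × Int × Int)) : Decidable (Pre_adv_solve_3dm q triples) := by unfold Pre_adv_solve_3dm; infer_instance

def pvWitness_adv_solve_3dm : Int × (List (Int × Int × Int)) := (1, [(1, 2, 3)])


def Spec_adv_solve_3dm (q : Int) (triples : List (Int × Int × Int)) (out : Option (List Int)) : Prop := out = adv_solve_3dm_alt q triples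
instance (q : Int) (triples : List (Int × Int × Int)) (out : Option (List Int)) : Decidable (Spec_adv_solve_3dm q triples out) := by unfold Spec_adv_solve_3dm; infer_instance

-- ===== CLAIM (what is proved, stated in full; the proofs are below) =====
def Claim_equal_adv_solve_3dm : Prop := ∀ (q : Int) (triples : List (Int × Int × Int)), Dom_adv_solve_3dm q triples → Pre_adv_solve_3dm q triples → Spec_adv_solve_3dm q triples (adv_solve_3dm q triples)

-- ===== LEMMAS AND PROOFS =====

-- Proof-side abstractions: everything over Nat indices reading triples with getD.
def pvOkGo (triples : List (Int × Int × Int)) :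
    List Nat → PySem.Set Int → PySem.Set Int → PySem.Set Int →
    Bool × (PySem.Set Int × PySem.Set Int × PySem.Set Int)
  | [], ww, xx, yy => (true, (ww, xx, yy))
  | idx :: rest, ww, xx, yy =>
    let abc := triples.getD idx (0, 0, 0)
    if PySem.Set.contains ww abc.1 || PySem.Set.contains xx abc.2.1 || PySem.Set.contains yy abc.2.2 then
      (false, (ww, xx, yy))
    else
      pvOkGo triples rest (PySem.Set.add ww abc.1) (PySem.Set.add xx abc.2.1) (PySem.Set.add yy abc.2.2)

def pvBuild (t : Nat) (l : List Nat) : List Int :=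
  l.foldl (fun cfg idx => cfg.set idx 1) (List.replicate t 0)

-- first-success scan over a list of candidate completions
def pvF (triples : List (Int × Int × Int)) (t : Nat) (chosen : List Nat)
    (ww xx yy : PySem.Set Int) : List (List Nat) → Option (List Int)
  | [] => none
  | c :: cs =>
    if (pvOkGo triples c ww xx yy).1 then some (pvBuild t (chosen ++ c))
    else pvF triples t chosen ww xx yy cs


lemma pvValidGo_map_cast (triples : List (Int × Int × Int)) (c : List Nat)
    (ww xx yy : PySem.Set Int) :
    pvValidGo triples (List.map (Nat.cast : Nat → Int) c) ww xx yy = pvOkGo triples c ww xx yy := by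
  induction c generalizing ww xx yy with
  | nil => rfl
  | cons n rest ih =>
    rw [List.map_cons, pvValidGo, pvOkGo]
    simp only [PySem.List.pyGetD_natCast]
    split_ifs <;> simp [ih]

lemma pvBuildCfgA_map_cast (t : Nat) (c : List Nat) :
    pvBuildCfgA t (List.map (Nat.cast : Nat → Int) c) = pvBuild t c := by
  unfold pvBuildCfgA pvBuild
  rw [List.foldl_map]
  simp

lemma pvOkGo_len (triples : List (Int × Int × Int)) (c : List Nat) :
    ∀ (ww xx yy : PySem.Set Int) s,
      pvOkGo triples c ww xx yy = (true, s) →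
      s.1.length = ww.length + c.length ∧
      s.2.1.length = xx.length + c.length ∧
      s.2.2.length = yy.length + c.length := by
  induction c with
  | nil =>
    intro ww xx yy s h
    simp [pvOkGo] at h
    subst h
    simp
  | cons n rest ih =>
    intro ww xx yy s h
    rw [pvOkGo] at h
    split_ifs at h with hmem
    · simp at h
    · have hrec := ih _ _ _ _ h
      simp only [Bool.or_eq_true, not_or, Bool.not_eq_true] at hmem
      obtain ⟨⟨h1, h2⟩, h3⟩ := hmem
      have h1' : (triples[n]?.getD (0,0,0)).1 ∉ ww := by simpa using h1
      have h2' : (triples[n]?.getD (0,0,0)).2.1 ∉ xx := by simpa using h2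
      have h3' : (triples[n]?.getD (0,0,0)).2.2 ∉ yy := by simpa using h3
      simp [PySem.Set.add, h1', h2', h3'] at hrec ⊢
      omega

lemma pvCombos_length {α : Type} (l : List α) (k : Nat) :
    ∀ c ∈ pvCombos l k, c.length = k := by
  induction l generalizing k with
  | nil =>
    intro c hc
    cases k with
    | zero => simp [pvCombos] at hc; simp [hc]
    | succ k => simp [pvCombos] at hc
  | cons x xs ih =>
    intro c hc
    cases k with
    | zero => simp [pvCombos] at hc; simp [hc]
    | succ k =>
      simp only [pvCombos, List.mem_append, List.mem_map] at hc
      rcases hc with ⟨c', hc', rfl⟩ | hc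
      · simp [ih _ _ hc']
      · exact ih _ _ hc

lemma pvCombos_map {α β : Type} (f : α → β) (l : List α) (k : Nat) :
    pvCombos (l.map f) k = (pvCombos l k).map (List.map f) := by
  induction l generalizing k with
  | nil => cases k <;> simp [pvCombos]
  | cons x xs ih =>
    cases k with
    | zero => simp [pvCombos]
    | succ k => simp [pvCombos, ih, Function.comp_def]

lemma pvFindA_eq_pvF (q : Int) (hq : 0 ≤ q) (triples : List (Int × Int × Int))
    (cs : List (List Nat)) (hlen : ∀ c ∈ cs, c.length = q.toNat) :
    pvFindA q triples (cs.map (List.map (Nat.cast : Nat → Int))) =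
      pvF triples triples.length [] PySem.Set.empty PySem.Set.empty PySem.Set.empty cs := by
  induction cs with
  | nil => rfl
  | cons c cs ih =>
    rw [List.map_cons, pvFindA, pvF]
    simp only [pvValidGo_map_cast]
    rcases hok : pvOkGo triples c PySem.Set.empty PySem.Set.empty PySem.Set.empty with ⟨b, s⟩
    cases b with
    | false =>
      simp only [hok]
      simpa using ih (fun c hc => hlen c (List.mem_cons_of_mem _ hc))
    | true =>
      have hl := pvOkGo_len triples c _ _ _ _ hok
      have hc : c.length = q.toNat := hlen c List.mem_cons_self
      have hlen1 : (PySem.Set.len s.1 == q) = true := by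
        simp [PySem.Set.len, hl.1, PySem.Set.empty, hc]; omega
      have hlen2 : (PySem.Set.len s.2.1 == q) = true := by
        simp [PySem.Set.len, hl.2.1, PySem.Set.empty, hc]; omega
      have hlen3 : (PySem.Set.len s.2.2 == q) = true := by
        simp [PySem.Set.len, hl.2.2, PySem.Set.empty, hc]; omega
      simp only [hok, hlen1, hlen2, hlen3, Bool.and_self, if_true]
      rw [pvBuildCfgA_map_cast]
      simp

lemma pvF_append (triples : List (Int × Int × Int)) (t : Nat) (chosen : List Nat)
    (ww xx yy : PySem.Set Int) (u v : List (List Nat)) :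
    pvF triples t chosen ww xx yy (u ++ v) =
      (pvF triples t chosen ww xx yy u).or (pvF triples t chosen ww xx yy v) := by
  induction u with
  | nil => simp [pvF]
  | cons c cs ih => simp only [List.cons_append, pvF]; split_ifs <;> simp [ih]

lemma pvF_map_cons_fresh (triples : List (Int × Int × Int)) (t i : Nat)
    (chosen : List Nat) (ww xx yy : PySem.Set Int)
    (hfresh : (PySem.Set.contains ww (triples.getD i (0,0,0)).1 ||
               PySem.Set.contains xx (triples.getD i (0,0,0)).2.1 ||
               PySem.Set.contains yy (triples.getD i (0,0,0)).2.2) = false)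
    (cs : List (List Nat)) :
    pvF triples t chosen ww xx yy (cs.map (i :: ·)) =
      pvF triples t (chosen ++ [i])
        (PySem.Set.add ww (triples.getD i (0,0,0)).1)
        (PySem.Set.add xx (triples.getD i (0,0,0)).2.1)
        (PySem.Set.add yy (triples.getD i (0,0,0)).2.2) cs := by
  induction cs with
  | nil => rfl
  | cons c cs ih =>
    rw [List.map_cons, pvF, pvF, pvOkGo]
    rw [hfresh]
    simp only [Bool.false_eq_true, if_false]
    split_ifs with h
    · simp [List.append_assoc]
    · exact ih

lemma pvF_map_cons_stale (triples : List (Int × Int × Int)) (t i : Nat)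
    (chosen : List Nat) (ww xx yy : PySem.Set Int)
    (hst : (PySem.Set.contains ww (triples.getD i (0,0,0)).1 ||
            PySem.Set.contains xx (triples.getD i (0,0,0)).2.1 ||
            PySem.Set.contains yy (triples.getD i (0,0,0)).2.2) = true)
    (cs : List (List Nat)) :
    pvF triples t chosen ww xx yy (cs.map (i :: ·)) = none := by
  induction cs with
  | nil => rfl
  | cons c cs ih =>
    rw [List.map_cons, pvF, pvOkGo]
    rw [hst]
    simpa using ih

-- MAIN INVARIANT: backtracking equals first-success scan over the remaining combos.
lemma pvBt_eq_pvF (q : Int) (hq : 0 ≤ q) (triples : List (Int × Int × Int)) :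
    ∀ (rem : List (Int × Int × Int)) (i : Nat), rem = triples.drop i →
    ∀ (chosen : List Nat), chosen.length ≤ q.toNat →
    ∀ (ww xx yy : PySem.Set Int),
      pvBt q triples.length rem i chosen ww xx yy =
        pvF triples triples.length chosen ww xx yy
          (pvCombos (List.range' i (triples.length - i)) (q.toNat - chosen.length)) := by
  intro rem
  induction rem with
  | nil =>
    intro i hdrop chosen hle ww xx yy
    have hit : triples.length ≤ i := by
      have := congrArg List.length hdrop; simp at this; omega
    rw [pvBt]
    by_cases hq' : (chosen.length : Int) = q
    · have hk0 : q.toNat - chosen.length = 0 := by omega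
      rw [if_pos (by simpa using hq'), hk0]
      simp [pvCombos, pvF, pvOkGo, pvBuild]
    · have hlt : chosen.length < q.toNat := by omega
      obtain ⟨k, hk⟩ : ∃ k, q.toNat - chosen.length = k + 1 := ⟨q.toNat - chosen.length - 1, by omega⟩
      have hni : triples.length - i = 0 := by omega
      rw [if_neg (by simpa using hq'), hk, hni]
      simp [pvCombos, pvF]
  | cons abc rest ih =>
    intro i hdrop chosen hle ww xx yy
    obtain ⟨a, b, c⟩ := abc
    have hit : i < triples.length := by
      by_contra h
      rw [List.drop_eq_nil_of_le (by omega)] at hdrop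
      simp at hdrop
    have hrest : rest = triples.drop (i + 1) := by
      have := congrArg (List.drop 1) hdrop
      simpa [List.drop_drop, Nat.add_comm] using this
    have hget : triples[i]? = some (a, b, c) := by
      have h0 : (List.drop i triples)[0]? = some (a, b, c) := by rw [← hdrop]; rfl
      simpa using h0
    have habc : triples.getD i (0, 0, 0) = (a, b, c) := by
      simp [List.getD_eq_getElem?_getD, hget]
    rw [pvBt]
    by_cases hq' : (chosen.length : Int) = q
    · have hk0 : q.toNat - chosen.length = 0 := by omega
      rw [if_pos (by simpa using hq'), hk0]
      simp [pvCombos, pvF, pvOkGo, pvBuild]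
    · have hlt : chosen.length < q.toNat := by omega
      obtain ⟨k, hk⟩ : ∃ k, q.toNat - chosen.length = k + 1 := ⟨q.toNat - chosen.length - 1, by omega⟩
      have hrange : List.range' i (triples.length - i) = i :: List.range' (i + 1) (triples.length - (i + 1)) := by
        have h1 : triples.length - i = (triples.length - (i + 1)) + 1 := by omega
        rw [h1, List.range'_succ]
      rw [if_neg (by simpa using hq'), hk, hrange, pvCombos, pvF_append]
      have hinc := ih (i + 1) hrest (chosen ++ [i]) (by simp; omega)
        (PySem.Set.add ww a) (PySem.Set.add xx b) (PySem.Set.add yy c)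
      have hskip := ih (i + 1) hrest chosen (by omega) ww xx yy
      have hk' : q.toNat - (chosen ++ [i]).length = k := by simp; omega
      rw [hk'] at hinc
      rw [hk] at hskip
      by_cases hfresh : (PySem.Set.contains ww a || PySem.Set.contains xx b || PySem.Set.contains yy c) = false
      · have h1 : PySem.Set.contains ww a = false ∧ PySem.Set.contains xx b = false ∧ PySem.Set.contains yy c = false := by
          simp only [Bool.or_eq_false_iff] at hfresh
          exact ⟨hfresh.1.1, hfresh.1.2, hfresh.2⟩
        have hguard : (!PySem.Set.contains ww a && !PySem.Set.contains xx b && !PySem.Set.contains yy c) = true := by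
          rw [h1.1, h1.2.1, h1.2.2]; rfl
        rw [if_pos hguard]
        have hfresh' : (PySem.Set.contains ww (triples.getD i (0,0,0)).1 ||
            PySem.Set.contains xx (triples.getD i (0,0,0)).2.1 ||
            PySem.Set.contains yy (triples.getD i (0,0,0)).2.2) = false := by
          rw [habc]; exact hfresh
        rw [pvF_map_cons_fresh triples triples.length i chosen ww xx yy hfresh', habc]
        rw [hinc, hskip]
        rcases pvF triples triples.length (chosen ++ [i])
          (PySem.Set.add ww a) (PySem.Set.add xx b) (PySem.Set.add yy c)
          (pvCombos (List.range' (i + 1) (triples.length - (i + 1))) k) with _ | r <;>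
          simp [Option.or]
      · have hst : (PySem.Set.contains ww a || PySem.Set.contains xx b || PySem.Set.contains yy c) = true := by
          rcases Bool.eq_false_or_eq_true (PySem.Set.contains ww a || PySem.Set.contains xx b || PySem.Set.contains yy c) with h | h
          · exact h
          · exact absurd h hfresh
        have hguard : (!PySem.Set.contains ww a && !PySem.Set.contains xx b && !PySem.Set.contains yy c) = false := by
          simp only [Bool.or_eq_true] at hst
          rcases hst with (h | h) | h <;> rw [h] <;> simp
        rw [if_neg (by rw [hguard]; simp)]
        have hst' : (PySem.Set.contains ww (triples.getD i (0,0,0)).1 ||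
            PySem.Set.contains xx (triples.getD i (0,0,0)).2.1 ||
            PySem.Set.contains yy (triples.getD i (0,0,0)).2.2) = true := by
          rw [habc]; exact hst
        rw [pvF_map_cons_stale triples triples.length i chosen ww xx yy hst', hskip, Option.or]

-- ===== VERDICT (by name: the statement is the Claim_ definition above) =====
theorem adv_solve_3dm_spec : Claim_equal_adv_solve_3dm := by
  intro q triples _ hq
  unfold Spec_adv_solve_3dm adv_solve_3dm adv_solve_3dm_alt
  by_cases hlt : (triples.length : Int) < q
  · simp [hlt]
  · simp only [hlt, if_false]
    have hrange : PySem.List.pyRange 0 (triples.length : Int) 1 =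
        (List.range triples.length).map (Nat.cast : Nat → Int) := by
      simpa using PySem.List.pyRange_zero_natCast triples.length
    rw [hrange, pvCombos_map,
      pvFindA_eq_pvF q hq triples _ (fun c hc => pvCombos_length _ _ c hc)]
    have hmain := pvBt_eq_pvF q hq triples triples 0 (by simp) [] (by simp) PySem.Set.empty PySem.Set.empty PySem.Set.empty
    rw [hmain]
    rw [List.range_eq_range']
    simp
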